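-- pv_equiv track=rewrite | github.com/dlwnsgud8406/mysolved | programmers/level2/2_selectgul.py | solution
-- ===== SOURCE A (Python) =====
-- from collections import Counter
--
-- def solution(k, tangerine):
--     answer = 0
--     counter = Counter(tangerine)
--     counter = sorted(counter.values())
--     counts = 0
--     while counts < k:
--         counts += counter.pop()
--         answer += 1
--     return answer
-- ===== SOURCE B (Python) =====
-- from collections import Counter
--
-- def solution(k, tangerine):
--     # group sizes, largest first
--     sizes = sorted(Counter(tangerine).values(), reverse=True)
--     # prefix[j] = total tangerines in the j largest groups
--     prefix = [0]
--     for s in sizes: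
--         prefix.append(prefix[-1] + s)
--     # binary search (standard bisect_left) for the first prefix sum >= k
--     lo, hi = 0, len(prefix)
--     while lo < hi:
--         mid = (lo + hi) // 2
--         if prefix[mid] < k:
--             lo = mid + 1
--         else:
--             hi = mid
--     return lo
-- ===== Notes on version B (the rewrite author's own statement) =====
-- stated objective: alternative
-- what changed: B replaces A's greedy pop()-and-accumulate while loop by a staged computation: sort group sizes descending, tabulate prefix sums, and binary-search (bisect_left) for the first prefix sum that reaches k.
import Mathlib
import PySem

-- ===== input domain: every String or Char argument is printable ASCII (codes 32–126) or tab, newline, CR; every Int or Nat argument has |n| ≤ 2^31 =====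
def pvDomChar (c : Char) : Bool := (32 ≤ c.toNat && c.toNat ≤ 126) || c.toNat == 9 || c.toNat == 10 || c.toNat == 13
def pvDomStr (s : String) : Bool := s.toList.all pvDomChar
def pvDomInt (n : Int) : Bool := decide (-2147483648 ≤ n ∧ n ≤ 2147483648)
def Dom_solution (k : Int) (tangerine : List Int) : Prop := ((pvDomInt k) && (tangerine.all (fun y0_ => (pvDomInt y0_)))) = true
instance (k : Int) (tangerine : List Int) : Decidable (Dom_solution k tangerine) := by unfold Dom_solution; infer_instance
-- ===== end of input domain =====

-- B replaces A's greedy pop()-and-accumulate while loop by staged passes: sort the group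
-- sizes descending, tabulate prefix sums, then binary-search (bisect_left) for the first
-- prefix sum reaching k (alternative algorithm, same cost).

-- ===== PORT A =====
-- while counts < k: counts += counter.pop(); answer += 1   (pop from empty = IndexError, excluded by Pre_; port returns answer there)
def solutionLoop (k : Int) (counter : List Int) (counts answer : Int) : Int :=
  if counts < k then
    match h : PySem.List.pop? counter (-1) with
    | some (x, rest) => solutionLoop k rest (counts + x) (answer + 1)
    | none => answer
  else answer
termination_by counter.length
decreasing_by
  have := PySem.List.length_of_pop?_eq_some counter h; simp at this; omega

def solution (k : Int) (tangerine : List Int) : Int :=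
  let counter := PySem.Dict.counter tangerine
  let sortedVals := PySem.List.sorted counter.values (fun x => x) false
  solutionLoop k sortedVals 0 0

-- ===== PORT B =====
-- for s in sizes: prefix.append(prefix[-1] + s)   (acc starts as [0], so it is never empty
-- and prefix[-1] is its last element, ported as getLastD)
def prefixLoop (acc : List Int) : List Int → List Int
  | [] => acc
  | s :: rest => prefixLoop (acc ++ [acc.getLastD 0 + s]) rest

def solution_alt (k : Int) (tangerine : List Int) : Int :=
  let sizes := PySem.List.sorted (PySem.Dict.counter tangerine).values (fun x => x) true
  let pfx := prefixLoop [0] sizes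
  -- the hand-written lo/hi halving loop in Source B is exactly Python's bisect_left,
  -- ported as PySem.List.bisectLeft
  ((PySem.List.bisectLeft pfx k : Nat) : Int)

-- ===== PRECONDITION & SPEC =====
-- A raises IndexError (pop from the exhausted list) iff k > len(tangerine); Pre_ admits exactly the inputs where A returns.
def Pre_solution (k : Int) (tangerine : List Int) : Prop := k ≤ (tangerine.length : Int)
instance (k : Int) (tangerine : List Int) : Decidable (Pre_solution k tangerine) := by unfold Pre_solution; infer_instance
def pvWitness_solution : Int × List Int := (3, [1, 1, 2])

def Spec_solution (k : Int) (tangerine : List Int) (out : Int) : Prop := out = solution_alt k tangerine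
instance (k : Int) (tangerine : List Int) (out : Int) : Decidable (Spec_solution k tangerine out) := by unfold Spec_solution; infer_instance

-- ===== CLAIM (what is proved, stated in full; the proofs are below) =====
def Claim_equal_solution : Prop := ∀ (k : Int) (tangerine : List Int), Dom_solution k tangerine → Pre_solution k tangerine → Spec_solution k tangerine (solution k tangerine)

-- ===== LEMMAS AND PROOFS =====

-- the common reference: walk a descending list of group sizes, one group per step, until k is covered
def greedy : List Int → Int → Int
  | [], _ => 0
  | x :: xs, k => if k ≤ 0 then 0 else 1 + greedy xs (k - x)

-- the prefix sums appended after a running last value t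
def prefixes (t : Int) : List Int → List Int
  | [] => []
  | s :: rest => (t + s) :: prefixes (t + s) rest

-- A's pop()-loop is `greedy` on the reversed list, provided the list holds enough tangerines
theorem solutionLoop_eq_greedy (k : Int) (l : List Int) (counts answer : Int)
    (h : k - counts ≤ l.sum) :
    solutionLoop k l counts answer = answer + greedy l.reverse (k - counts) := by
  induction l using List.reverseRecOn generalizing counts answer with
  | nil =>
      rw [solutionLoop.eq_def]
      simp only [List.sum_nil] at h
      have hnc : ¬ counts < k := by omega
      simp [hnc, greedy]
  | append_singleton l y ih =>
      rw [solutionLoop.eq_def]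
      simp only [List.reverse_append, List.reverse_cons, List.reverse_nil, List.nil_append,
        List.cons_append, List.sum_append, List.sum_cons, List.sum_nil] at h ⊢
      by_cases hc : counts < k
      · simp only [hc, if_true]
        split
        next x' rest' hp =>
          rw [PySem.List.pop?_last] at hp
          simp only [Option.some.injEq, Prod.mk.injEq] at hp
          obtain ⟨rfl, rfl⟩ := hp
          rw [ih (counts + y) (answer + 1) (by omega)]
          rw [greedy]
          have hng : ¬ (k - counts ≤ 0) := by omega
          simp only [hng, if_false]
          have he : k - (counts + y) = k - counts - y := by ring
          rw [he]; ring
        next hp =>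
          rw [PySem.List.pop?_last] at hp
          exact absurd hp (by simp)
      · simp only [hc, if_false, greedy]
        have : k - counts ≤ 0 := by omega
        simp [this]

-- Counter's values sum to the length of the counted list
theorem values_counter_sum (xs : List Int) :
    (PySem.Dict.counter xs).values.sum = (xs.length : Int) := by
  rw [PySem.Dict.values_eq_map_keys _ (PySem.Dict.nodup_keys_counter xs) 0]
  rw [PySem.Dict.keys_counter]
  have h1 : (PySem.Set.ofList xs).map (fun k => (PySem.Dict.counter xs).getD k 0)
      = (PySem.Set.ofList xs).map (fun k => ((xs.count k : Nat) : Int)) := by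
    apply List.map_congr_left
    intro a _
    rw [PySem.Dict.getD_counter]
  rw [h1]
  have hperm : (PySem.Set.ofList xs).Perm xs.dedup := by
    rw [List.perm_ext_iff_of_nodup (PySem.Set.nodup_ofList xs) xs.nodup_dedup]
    intro a
    rw [PySem.Set.mem_ofList, List.mem_dedup]
  rw [List.Perm.sum_eq (hperm.map _)]
  have h2 : (xs.dedup.map (fun k => ((xs.count k : Nat) : Int))).sum
      = ((xs.dedup.map (fun k => List.count k xs)).map (Nat.cast : Nat → Int)).sum := by
    rw [List.map_map]; rfl
  rw [h2, ← Nat.cast_list_sum, List.sum_map_count_dedup_eq_length xs]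

-- Counter's values are the counts of present keys, hence positive
theorem values_counter_pos (xs : List Int) :
    ∀ v ∈ (PySem.Dict.counter xs).values, 0 < v := by
  intro v hv
  rw [PySem.Dict.values_eq_map_keys _ (PySem.Dict.nodup_keys_counter xs) 0] at hv
  obtain ⟨a, ha, rfl⟩ := List.mem_map.mp hv
  rw [PySem.Dict.keys_counter, PySem.Set.mem_ofList] at ha
  rw [PySem.Dict.getD_counter]
  have : 0 < xs.count a := List.count_pos_iff.mpr ha
  exact_mod_cast this

-- sorted ascending, reversed  =  sorted descending (Int values, identity key)
theorem reverse_sorted_eq_sorted_rev (xs : List Int) :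
    (PySem.List.sorted xs (fun x => x) false).reverse = PySem.List.sorted xs (fun x => x) true := by
  apply PySem.List.eq_of_perm_of_pairwise_le_of_injective (fun x : Int => -x) neg_injective
  · exact ((PySem.List.sorted xs (fun x => x) false).reverse_perm.trans
      (PySem.List.sorted_perm _ _ _)).trans (PySem.List.sorted_perm _ _ _).symm
  · exact List.pairwise_reverse.mpr
      ((PySem.List.sorted_pairwise xs (fun x => x)).imp (fun hab => by omega))
  · exact (PySem.List.sorted_pairwise_rev xs (fun x => x)).imp (fun hab => by omega)

-- the append loop builds the running prefix sums after its accumulator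
theorem prefixLoop_eq (l : List Int) (acc : List Int) :
    prefixLoop acc l = acc ++ prefixes (acc.getLastD 0) l := by
  induction l generalizing acc with
  | nil => simp [prefixLoop, prefixes]
  | cons s rest ih =>
      rw [prefixLoop, ih, prefixes]
      simp

-- the j-th running prefix sum is the sum of the first j+1 elements, shifted by t
theorem prefixes_getElem (l : List Int) (t : Int) (j : Nat) (hj : j < (prefixes t l).length) :
    (prefixes t l)[j] = t + (l.take (j + 1)).sum := by
  induction l generalizing t j with
  | nil => simp [prefixes] at hj
  | cons s rest ih =>
      cases j with
      | zero => simp [prefixes]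
      | succ j =>
          simp only [prefixes, List.getElem_cons_succ, List.take_succ_cons, List.sum_cons]
          rw [ih]
          ring

theorem prefixes_length (l : List Int) (t : Int) : (prefixes t l).length = l.length := by
  induction l generalizing t with
  | nil => rfl
  | cons s rest ih => simp [prefixes, ih]

-- the full prefix table: entry j = sum of the first j elements
theorem prefixTable_getElem (l : List Int) (j : Nat) (hj : j < (0 :: prefixes 0 l).length) :
    (0 :: prefixes 0 l)[j] = (l.take j).sum := by
  cases j with
  | zero => simp
  | succ j =>
      simp only [List.getElem_cons_succ]
      rw [prefixes_getElem]
      simp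

-- with nonnegative entries, the prefix table is nondecreasing
theorem prefixTable_pairwise (l : List Int) (hpos : ∀ x ∈ l, 0 < x) :
    (0 :: prefixes 0 l).Pairwise (· ≤ ·) := by
  rw [List.pairwise_iff_getElem]
  intro i j hi hj hij
  rw [prefixTable_getElem l i hi, prefixTable_getElem l j hj]
  have : l.take j = l.take i ++ (l.drop i).take (j - i) := by
    rw [← List.take_add]
    congr 1
    omega
  rw [this, List.sum_append]
  have : 0 ≤ ((l.drop i).take (j - i)).sum := by
    apply List.sum_nonneg
    intro x hx
    have hx1 : x ∈ l.drop i := List.mem_of_mem_take hx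
    have : x ∈ l := List.mem_of_mem_drop hx1
    exact le_of_lt (hpos x this)
  omega

-- greedy never returns a negative count
theorem greedy_nonneg (l : List Int) (k : Int) : 0 ≤ greedy l k := by
  induction l generalizing k with
  | nil => simp [greedy]
  | cons x xs ih =>
      rw [greedy]
      split
      · omega
      · have := ih (k - x); omega

-- greedy's answer counts exactly the prefix sums that are still below k
theorem greedy_iff (l : List Int) (k : Int) (hpos : ∀ x ∈ l, 0 < x) (hk : k ≤ l.sum) :
    ∀ j : Nat, ((l.take j).sum < k ↔ (j : Int) < greedy l k) := by
  induction l generalizing k with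
  | nil =>
      intro j
      simp only [List.sum_nil] at hk
      simp only [List.take_nil, List.sum_nil, greedy]
      omega
  | cons x xs ih =>
      intro j
      have hxpos : 0 < x := hpos x List.mem_cons_self
      have hxs : ∀ y ∈ xs, 0 < y := fun y hy => hpos y (List.mem_cons_of_mem _ hy)
      by_cases hk0 : k ≤ 0
      · simp only [greedy, hk0, if_true]
        cases j with
        | zero => simp; omega
        | succ j =>
            simp only [List.take_succ_cons, List.sum_cons, Nat.cast_succ]
            have : 0 ≤ (xs.take j).sum :=
              List.sum_nonneg (fun y hy => le_of_lt (hxs y (List.mem_of_mem_take hy)))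
            omega
      · simp only [greedy, hk0, if_false]
        simp only [List.sum_cons] at hk
        have hg := greedy_nonneg xs (k - x)
        cases j with
        | zero =>
            simp only [List.take_zero, List.sum_nil, Nat.cast_zero]
            omega
        | succ j =>
            simp only [List.take_succ_cons, List.sum_cons, Nat.cast_succ]
            have hiff := ih (k - x) hxs (by omega) j
            omega

-- ===== VERDICT (by name: the statement is the Claim_ definition above) =====
theorem solution_spec : Claim_equal_solution := by
  intro k tangerine _ hpre
  unfold Pre_solution at hpre
  unfold Spec_solution solution solution_alt
  set vals := (PySem.Dict.counter tangerine).values with hvals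
  have hpos : ∀ x ∈ PySem.List.sorted vals (fun x => x) true, 0 < x := by
    intro x hx
    exact values_counter_pos tangerine x ((PySem.List.mem_sorted _ _ _ _).mp hx)
  set l := PySem.List.sorted vals (fun x => x) true with hl
  have hsuml : l.sum = vals.sum := (PySem.List.sorted_perm vals (fun x => x) true).sum_eq
  have hk : k ≤ l.sum := by
    rw [hsuml, hvals, values_counter_sum]; omega
  -- A's side: the pop loop is greedy on the descending list
  have hA : solutionLoop k (PySem.List.sorted vals (fun x => x) false) 0 0 = greedy l k := by
    have hsum0 : k - 0 ≤ (PySem.List.sorted vals (fun x => x) false).sum := by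
      rw [(PySem.List.sorted_perm vals (fun x => x) false).sum_eq, hvals, values_counter_sum]
      omega
    rw [solutionLoop_eq_greedy k _ 0 0 hsum0, reverse_sorted_eq_sorted_rev, ← hl]
    simp
  rw [hA]
  show greedy l k = ((PySem.List.bisectLeft (prefixLoop [0] l) k : Nat) : Int)
  rw [prefixLoop_eq]
  have h00 : (([0] : List Int).getLastD 0) = 0 := rfl
  rw [h00, List.singleton_append]
  -- B's side: bisect_left on the prefix table
  set P := (0 : Int) :: prefixes 0 l with hP
  have hPsorted : P.Pairwise (· ≤ ·) := prefixTable_pairwise l hpos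
  obtain ⟨hr1, hr2, hr3⟩ := PySem.List.bisectLeft_spec P k hPsorted
  set r := PySem.List.bisectLeft P k with hr
  have hPlen : P.length = l.length + 1 := by simp [hP, prefixes_length]
  have hiff := greedy_iff l k hpos hk
  -- greedy ≤ len
  have hgle : greedy l k ≤ (l.length : Int) := by
    by_contra hcon
    have htake := (hiff l.length).mpr (by omega)
    rw [List.take_length] at htake
    omega
  have hg0 : 0 ≤ greedy l k := greedy_nonneg l k
  -- r = greedy
  rcases lt_trichotomy ((r : Int)) (greedy l k) with hlt | heq | hgt
  · exfalso
    have hrlen : r < P.length := by omega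
    have := hr3 r hrlen (le_refl r)
    rw [prefixTable_getElem l r (by omega)] at this
    have := (hiff r).mpr hlt
    omega
  · omega
  · exfalso
    have hglen : (greedy l k).toNat < P.length := by omega
    have h2 := hr2 (greedy l k).toNat hglen (by omega)
    rw [prefixTable_getElem l (greedy l k).toNat (by omega)] at h2
    have := (hiff (greedy l k).toNat).mp h2
    omega
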